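-- pv_equiv track=rewrite | github.com/Sabarish-29/phoenix-guardian-v4 | phoenix_guardian/agents/fraud.py | _suggest_appropriate_code
-- ===== SOURCE A (Python) =====
-- EM_CODE_REQUIREMENTS = {
--     "99211": {"min_elements": 0, "min_duration": 5, "complexity": "minimal"},
--     "99212": {"min_elements": 3, "min_duration": 10, "complexity": "straightforward"},
--     "99213": {"min_elements": 6, "min_duration": 15, "complexity": "low"},
--     "99214": {"min_elements": 9, "min_duration": 25, "complexity": "moderate"},
--     "99215": {"min_elements": 12, "min_duration": 40, "complexity": "high"},
-- }
--
-- COMPLEXITY_LEVELS = {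
--     "minimal": 1,
--     "straightforward": 2,
--     "low": 3,
--     "moderate": 4,
--     "high": 5,
-- }
--
-- def _suggest_appropriate_code(
--
--     complexity: str,
--     duration: int,
--     elements: int,
-- ) -> str:
--     """Suggest the appropriate E/M code based on documentation."""
--     for code, reqs in sorted(
--         EM_CODE_REQUIREMENTS.items(), key=lambda x: x[0], reverse=True
--     ):
--         if (
--             COMPLEXITY_LEVELS.get(complexity, 0)
--             >= COMPLEXITY_LEVELS.get(reqs["complexity"], 0)
--             and duration >= reqs["min_duration"]
--             and elements >= reqs["min_elements"]
--         ):
--             return code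
--     return "99211"
-- ===== SOURCE B (Python) =====
-- COMPLEXITY_LEVELS = {
--     "minimal": 1,
--     "straightforward": 2,
--     "low": 3,
--     "moderate": 4,
--     "high": 5,
-- }
--
-- # Code order with per-dimension thresholds, index-aligned (ascending).
-- _CODES = ("99211", "99212", "99213", "99214", "99215")
-- _MIN_DURATION = (5, 10, 15, 25, 40)
-- _MIN_ELEMENTS = (0, 3, 6, 9, 12)
--
--
-- def _suggest_appropriate_code(
--     complexity: str,
--     duration: int,
--     elements: int,
-- ) -> str:
--     """Suggest the appropriate E/M code based on documentation."""
--     dur_idx = sum(1 for t in _MIN_DURATION if duration >= t) - 1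
--     ele_idx = sum(1 for t in _MIN_ELEMENTS if elements >= t) - 1
--     cx_idx = COMPLEXITY_LEVELS.get(complexity, 0) - 1
--     k = min(dur_idx, ele_idx, cx_idx)
--     return _CODES[k] if k >= 0 else "99211"
-- ===== Notes on version B (the rewrite author's own statement) =====
-- stated objective: alternative
-- what changed: Replaces the top-down scan of codes with a combined three-part predicate by computing three independent per-dimension indices (count of duration thresholds met, count of element thresholds met, complexity level) and returning the code at the minimum index, falling back to '99211' when that minimum is negative.
import Mathlib
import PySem

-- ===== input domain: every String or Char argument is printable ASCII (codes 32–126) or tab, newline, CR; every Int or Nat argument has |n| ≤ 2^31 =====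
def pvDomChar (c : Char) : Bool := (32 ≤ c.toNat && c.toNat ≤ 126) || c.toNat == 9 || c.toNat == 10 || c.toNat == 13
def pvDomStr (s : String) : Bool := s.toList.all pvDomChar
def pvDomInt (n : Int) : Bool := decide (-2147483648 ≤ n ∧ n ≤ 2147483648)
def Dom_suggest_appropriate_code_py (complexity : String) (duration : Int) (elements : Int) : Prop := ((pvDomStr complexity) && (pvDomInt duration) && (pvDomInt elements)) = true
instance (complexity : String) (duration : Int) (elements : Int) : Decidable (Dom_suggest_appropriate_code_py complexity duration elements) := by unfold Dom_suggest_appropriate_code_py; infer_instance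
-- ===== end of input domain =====

-- B replaces A's top-down scan with a combined predicate by three independent
-- per-dimension indices (thresholds met per dimension) whose minimum selects the
-- code; objective: alternative decomposition, same cost on these fixed tables.

-- shared module constant: COMPLEXITY_LEVELS (used by both A and B, as in the Python module)
def pvComplexityLevels : PySem.Dict String Int :=
  PySem.Dict.ofList [("minimal", 1), ("straightforward", 2), ("low", 3), ("moderate", 4), ("high", 5)]

-- COMPLEXITY_LEVELS.get(c, 0)
def pvLevel (c : String) : Int := PySem.Dict.getD pvComplexityLevels c 0

-- ===== PORT A =====
-- EM_CODE_REQUIREMENTS as an association list; each reqs dict is the triple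
-- (min_elements, min_duration, complexity), its three fixed fields.
def pvEMReqs : List (String × (Int × Int × String)) :=
  [("99211", (0, 5, "minimal")), ("99212", (3, 10, "straightforward")),
   ("99213", (6, 15, "low")), ("99214", (9, 25, "moderate")), ("99215", (12, 40, "high"))]

-- the for-loop with early return over the sorted items
def pvLoopA (c : String) (d e : Int) : List (String × (Int × Int × String)) → String
  | [] => "99211"
  | (code, (me, md, cx)) :: rest =>
      if pvLevel c ≥ pvLevel cx ∧ d ≥ md ∧ e ≥ me then code else pvLoopA c d e rest

def suggest_appropriate_code_py (complexity : String) (duration : Int) (elements : Int) : String :=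
  pvLoopA complexity duration elements (PySem.List.sorted pvEMReqs (fun x => x.1) true)

-- ===== PORT B =====
def pvCodes : List String := ["99211", "99212", "99213", "99214", "99215"]
def pvMinDuration : List Int := [5, 10, 15, 25, 40]
def pvMinElements : List Int := [0, 3, 6, 9, 12]

def suggest_appropriate_code_py_alt (complexity : String) (duration : Int) (elements : Int) : String :=
  let durIdx : Int := (pvMinDuration.countP (fun t => duration ≥ t) : Int) - 1
  let eleIdx : Int := (pvMinElements.countP (fun t => elements ≥ t) : Int) - 1
  let cxIdx : Int := pvLevel complexity - 1
  let k := min (min durIdx eleIdx) cxIdx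
  -- _CODES[k]; whenever k ≥ 0 here k < 5, so the .getD default is never taken (totalization only)
  if k ≥ 0 then (PySem.List.pyGet? pvCodes k).getD "99211" else "99211"

-- ===== PRECONDITION & SPEC =====
def Spec_suggest_appropriate_code_py (complexity : String) (duration : Int) (elements : Int) (out : String) : Prop := out = suggest_appropriate_code_py_alt complexity duration elements
instance (complexity : String) (duration : Int) (elements : Int) (out : String) : Decidable (Spec_suggest_appropriate_code_py complexity duration elements out) := by unfold Spec_suggest_appropriate_code_py; infer_instance

-- ===== CLAIM (what is proved, stated in full; the proofs are below) =====
def Claim_equal_suggest_appropriate_code_py : Prop := ∀ (complexity : String) (duration : Int) (elements : Int), Dom_suggest_appropriate_code_py complexity duration elements → Spec_suggest_appropriate_code_py complexity duration elements (suggest_appropriate_code_py complexity duration elements)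

-- ===== LEMMAS AND PROOFS =====

-- COMPLEXITY_LEVELS.get(c, 0) takes one of the six values 0..5
lemma pvLevel_cases (c : String) :
    pvLevel c = 0 ∨ pvLevel c = 1 ∨ pvLevel c = 2 ∨ pvLevel c = 3 ∨ pvLevel c = 4 ∨ pvLevel c = 5 := by
  simp only [pvLevel, pvComplexityLevels, PySem.Dict.getD, PySem.Dict.get?, PySem.Dict.ofList,
    PySem.Dict.update, PySem.Dict.insert, PySem.Dict.empty]
  cases h1 : ("minimal" == c) <;> cases h2 : ("straightforward" == c) <;>
    cases h3 : ("low" == c) <;> cases h4 : ("moderate" == c) <;> cases h5 : ("high" == c) <;>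
    simp [h1, h2, h3, h4, h5]

lemma pvLevel_minimal : pvLevel "minimal" = 1 := by
  simp [pvLevel, pvComplexityLevels, PySem.Dict.getD, PySem.Dict.get?, PySem.Dict.ofList,
    PySem.Dict.update, PySem.Dict.insert, PySem.Dict.empty]
lemma pvLevel_straightforward : pvLevel "straightforward" = 2 := by
  simp [pvLevel, pvComplexityLevels, PySem.Dict.getD, PySem.Dict.get?, PySem.Dict.ofList,
    PySem.Dict.update, PySem.Dict.insert, PySem.Dict.empty]
lemma pvLevel_low : pvLevel "low" = 3 := by
  simp [pvLevel, pvComplexityLevels, PySem.Dict.getD, PySem.Dict.get?, PySem.Dict.ofList,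
    PySem.Dict.update, PySem.Dict.insert, PySem.Dict.empty]
lemma pvLevel_moderate : pvLevel "moderate" = 4 := by
  simp [pvLevel, pvComplexityLevels, PySem.Dict.getD, PySem.Dict.get?, PySem.Dict.ofList,
    PySem.Dict.update, PySem.Dict.insert, PySem.Dict.empty]
lemma pvLevel_high : pvLevel "high" = 5 := by
  simp [pvLevel, pvComplexityLevels, PySem.Dict.getD, PySem.Dict.get?, PySem.Dict.ofList,
    PySem.Dict.update, PySem.Dict.insert, PySem.Dict.empty]

-- sorted(EM_CODE_REQUIREMENTS.items(), key=lambda x: x[0], reverse=True) evaluated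
lemma pvSorted_eval : PySem.List.sorted pvEMReqs (fun x => x.1) true =
    [("99215", (12, 40, "high")), ("99214", (9, 25, "moderate")), ("99213", (6, 15, "low")),
     ("99212", (3, 10, "straightforward")), ("99211", (0, 5, "minimal"))] := by
  rw [PySem.List.sorted_rev_eq_foldl_insertBy]
  unfold pvEMReqs
  simp only [List.foldl_cons, List.foldl_nil]
  repeat (first
    | rfl
    | (simp only [PySem.List.insertBy, decide_eq_true_eq]
       rw [if_pos (by rw [String.lt_iff_toList_lt]; decide)]))

-- B's duration count as a threshold case split
lemma pvCount_dur (d : Int) :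
    ((pvMinDuration.countP (fun t => d ≥ t) : Nat) : Int) =
      if d ≥ 40 then 5 else if d ≥ 25 then 4 else if d ≥ 15 then 3
      else if d ≥ 10 then 2 else if d ≥ 5 then 1 else 0 := by
  simp only [pvMinDuration, List.countP_cons, List.countP_nil, decide_eq_true_eq]
  split_ifs <;> omega

-- B's elements count as a threshold case split
lemma pvCount_ele (e : Int) :
    ((pvMinElements.countP (fun t => e ≥ t) : Nat) : Int) =
      if e ≥ 12 then 5 else if e ≥ 9 then 4 else if e ≥ 6 then 3
      else if e ≥ 3 then 2 else if e ≥ 0 then 1 else 0 := by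
  simp only [pvMinElements, List.countP_cons, List.countP_nil, decide_eq_true_eq]
  split_ifs <;> omega

-- combined arithmetic core: A's descending chain over (level, counts) equals B's min-index pick
lemma pvCore (L dc ec : Int) (hL0 : 0 ≤ L) (hL5 : L ≤ 5) (hd0 : 0 ≤ dc) (hd5 : dc ≤ 5)
    (he0 : 0 ≤ ec) (he5 : ec ≤ 5) :
    (if L ≥ 5 ∧ dc ≥ 5 ∧ ec ≥ 5 then "99215"
     else if L ≥ 4 ∧ dc ≥ 4 ∧ ec ≥ 4 then "99214"
     else if L ≥ 3 ∧ dc ≥ 3 ∧ ec ≥ 3 then "99213"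
     else if L ≥ 2 ∧ dc ≥ 2 ∧ ec ≥ 2 then "99212"
     else if L ≥ 1 ∧ dc ≥ 1 ∧ ec ≥ 1 then "99211"
     else "99211")
    = if min (min (dc - 1) (ec - 1)) (L - 1) ≥ 0
        then (PySem.List.pyGet? pvCodes (min (min (dc - 1) (ec - 1)) (L - 1))).getD "99211"
        else "99211" := by
  interval_cases L <;> interval_cases dc <;> interval_cases ec <;> rfl

-- ===== VERDICT (by name: the statement is the Claim_ definition above) =====
set_option maxHeartbeats 1000000 in
theorem suggest_appropriate_code_py_spec : Claim_equal_suggest_appropriate_code_py := by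
  intro c d e _
  unfold Spec_suggest_appropriate_code_py suggest_appropriate_code_py suggest_appropriate_code_py_alt
  rw [pvSorted_eval]
  simp only [pvLoopA, pvLevel_minimal, pvLevel_straightforward, pvLevel_low,
    pvLevel_moderate, pvLevel_high]
  set L := pvLevel c with hL
  set dc : Int := ((pvMinDuration.countP (fun t => d ≥ t) : Nat) : Int) with hdc
  set ec : Int := ((pvMinElements.countP (fun t => e ≥ t) : Nat) : Int) with hec
  have h5 : (d ≥ 40) ↔ dc ≥ 5 := by rw [hdc, pvCount_dur]; split_ifs <;> omega
  have h4 : (d ≥ 25) ↔ dc ≥ 4 := by rw [hdc, pvCount_dur]; split_ifs <;> omega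
  have h3 : (d ≥ 15) ↔ dc ≥ 3 := by rw [hdc, pvCount_dur]; split_ifs <;> omega
  have h2 : (d ≥ 10) ↔ dc ≥ 2 := by rw [hdc, pvCount_dur]; split_ifs <;> omega
  have h1 : (d ≥ 5) ↔ dc ≥ 1 := by rw [hdc, pvCount_dur]; split_ifs <;> omega
  have g5 : (e ≥ 12) ↔ ec ≥ 5 := by rw [hec, pvCount_ele]; split_ifs <;> omega
  have g4 : (e ≥ 9) ↔ ec ≥ 4 := by rw [hec, pvCount_ele]; split_ifs <;> omega
  have g3 : (e ≥ 6) ↔ ec ≥ 3 := by rw [hec, pvCount_ele]; split_ifs <;> omega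
  have g2 : (e ≥ 3) ↔ ec ≥ 2 := by rw [hec, pvCount_ele]; split_ifs <;> omega
  have g1 : (e ≥ 0) ↔ ec ≥ 1 := by rw [hec, pvCount_ele]; split_ifs <;> omega
  simp only [h5, h4, h3, h2, h1, g5, g4, g3, g2, g1]
  have hLb : 0 ≤ L ∧ L ≤ 5 := by
    rcases pvLevel_cases c with h | h | h | h | h | h <;> rw [hL] <;> omega
  have hdb : 0 ≤ dc ∧ dc ≤ 5 := by rw [hdc, pvCount_dur]; split_ifs <;> omega
  have heb : 0 ≤ ec ∧ ec ≤ 5 := by rw [hec, pvCount_ele]; split_ifs <;> omega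
  exact pvCore L dc ec hLb.1 hLb.2 hdb.1 hdb.2 heb.1 heb.2
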